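-- pv_equiv track=rewrite | github.com/gitMasterMasterofGit/Mitsuke-san | FindWords.py | definition_string_clean
-- ===== SOURCE A (Python) =====
-- def definition_string_clean(string):
--     clean = ""
--     for char in string:
--         if char not in ["[", "]", "\'",  ",", " "]:
--             clean += char
--         elif char == ",":
--             clean += "\n"
--     return clean
-- ===== SOURCE B (Python) =====
-- def definition_string_clean(string):
--     return (string.replace("[", "")
--                   .replace("]", "")
--                   .replace("'", "")
--                   .replace(" ", "")
--                   .replace(",", "\n"))
-- ===== Notes on version B (the rewrite author's own statement) =====
-- stated objective: idiomatic
-- what changed: Replaced the per-character accumulator loop with a chain of whole-string str.replace passes (deleting each bracket/quote/space and turning commas into newlines); safe because the deleted characters and the comma are disjoint sets.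
import Mathlib
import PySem

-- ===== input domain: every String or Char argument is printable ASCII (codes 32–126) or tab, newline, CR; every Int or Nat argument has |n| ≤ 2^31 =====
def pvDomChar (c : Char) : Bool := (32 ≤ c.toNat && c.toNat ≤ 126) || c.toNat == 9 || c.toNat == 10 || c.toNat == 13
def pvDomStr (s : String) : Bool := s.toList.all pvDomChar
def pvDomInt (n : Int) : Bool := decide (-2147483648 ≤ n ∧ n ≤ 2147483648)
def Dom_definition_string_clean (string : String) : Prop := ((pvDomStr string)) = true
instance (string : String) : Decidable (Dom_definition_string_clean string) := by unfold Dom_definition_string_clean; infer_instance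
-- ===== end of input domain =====

-- B replaces A's per-character accumulator loop with a chain of whole-string replace passes (idiomatic).

-- ===== PORT A =====
def definition_string_clean (string : String) : String :=
  string.toList.foldl
    (fun clean c =>
      if ¬ (c ∈ ['[', ']', '\'', ',', ' ']) then clean.push c
      else if c = ',' then clean.push '\n'
      else clean)
    ""

-- ===== PORT B =====
def definition_string_clean_alt (string : String) : String :=
  PySem.Str.replace
    (PySem.Str.replace
      (PySem.Str.replace
        (PySem.Str.replace
          (PySem.Str.replace string "[" "")
          "]" "")
        "'" "")
      " " "")
    "," "\n"

-- ===== PRECONDITION & SPEC =====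
def Spec_definition_string_clean (string : String) (out : String) : Prop := out = definition_string_clean_alt string
instance (string : String) (out : String) : Decidable (Spec_definition_string_clean string out) := by unfold Spec_definition_string_clean; infer_instance

-- ===== CLAIM (what is proved, stated in full; the proofs are below) =====
def Claim_equal_definition_string_clean : Prop := ∀ (string : String), Dom_definition_string_clean string → Spec_definition_string_clean string (definition_string_clean string)

-- ===== LEMMAS AND PROOFS =====

-- the common character-level semantics: delete the stripped chars, comma ↦ newline
def pvClean (c : Char) : List Char :=
  if c ∈ ['[', ']', '\'', ' '] then []
  else if c = ',' then ['\n']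
  else [c]

-- single-char replace is a flatMap
def pvRepl (o : Char) (new : List Char) (c : Char) : List Char :=
  if c = o then new else [c]

lemma replace_go_single (o : Char) (new : List Char) :
    ∀ (l : List Char) (fuel : Nat) (acc : List Char), l.length ≤ fuel →
      PySem.Chars.replace.go [o] new fuel l acc
        = acc.reverse ++ l.flatMap (pvRepl o new) := by
  intro l
  induction l with
  | nil =>
    intro fuel acc _
    cases fuel <;> simp [PySem.Chars.replace.go]
  | cons c t ih =>
    intro fuel acc h
    cases fuel with
    | zero => simp at h
    | succ f =>
      rw [PySem.Chars.replace.go]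
      by_cases hc : c = o
      · subst hc
        have hp : [c].isPrefixOf (c :: t) = true := by simp [List.isPrefixOf]
        simp only [hp, if_pos]
        rw [show List.drop [c].length (c :: t) = t from rfl]
        rw [ih _ _ (by simpa using Nat.le_of_succ_le_succ h)]
        simp [pvRepl]
      · have hp : [o].isPrefixOf (c :: t) = false := by
          simp [List.isPrefixOf]
          exact fun h' => (hc h'.symm).elim
        simp only [hp]
        rw [ih _ _ (Nat.le_of_succ_le_succ h)]
        simp [pvRepl, hc]

lemma replace_single (o : Char) (new : List Char) (l : List Char) :
    PySem.Chars.replace l [o] new = l.flatMap (pvRepl o new) := by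
  rw [PySem.Chars.replace]
  simp only [List.isEmpty_cons, Bool.false_eq_true, if_false]
  simpa using replace_go_single o new l l.length [] le_rfl

lemma alt_eq_flatMap (s : String) :
    definition_string_clean_alt s = String.ofList (s.toList.flatMap pvClean) := by
  unfold definition_string_clean_alt
  simp only [PySem.Str.replace, String.toList_ofList]
  rw [show ("[" : String).toList = ['['] from rfl, show ("]" : String).toList = [']'] from rfl,
      show ("'" : String).toList = ['\''] from rfl, show (" " : String).toList = [' '] from rfl,
      show ("," : String).toList = [','] from rfl, show ("" : String).toList = [] from rfl,
      show ("\n" : String).toList = ['\n'] from rfl]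
  rw [replace_single, replace_single, replace_single, replace_single, replace_single]
  simp only [List.flatMap_assoc]
  congr 1
  apply List.flatMap_congr
  intro c _
  by_cases h1 : c = '[' <;> by_cases h2 : c = ']' <;> by_cases h3 : c = '\'' <;>
    by_cases h4 : c = ' ' <;> by_cases h5 : c = ',' <;>
    simp_all [pvRepl, pvClean]

lemma step_eq (acc : String) (c : Char) :
    (if ¬ (c ∈ ['[', ']', '\'', ',', ' ']) then acc.push c
     else if c = ',' then acc.push '\n'
     else acc) = String.ofList (acc.toList ++ pvClean c) := by
  by_cases h1 : c = '[' <;> by_cases h2 : c = ']' <;> by_cases h3 : c = '\'' <;>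
    by_cases h4 : c = ' ' <;> by_cases h5 : c = ',' <;>
    simp_all [pvClean, String.ofList_toList, String.ofList_append] <;> exact (String.append_left_inj acc).mp rfl

lemma a_foldl_eq (l : List Char) :
    ∀ acc : String,
      l.foldl
        (fun clean c =>
          if ¬ (c ∈ ['[', ']', '\'', ',', ' ']) then clean.push c
          else if c = ',' then clean.push '\n'
          else clean)
        acc = String.ofList (acc.toList ++ l.flatMap pvClean) := by
  induction l with
  | nil => intro acc; simp [String.ofList_toList]
  | cons c t ih =>
    intro acc
    simp only [List.foldl_cons]
    rw [step_eq, ih]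
    simp

-- ===== VERDICT (by name: the statement is the Claim_ definition above) =====
theorem definition_string_clean_spec : Claim_equal_definition_string_clean := by
  intro s _
  unfold Spec_definition_string_clean definition_string_clean
  rw [a_foldl_eq, alt_eq_flatMap]
  simp
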